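-- pv_equiv track=rewrite | github.com/felipeganho/signals-and-systems | Lab003/ex01e - Felipe Silva Ganho.py | gera_sinal
-- ===== SOURCE A (Python) =====
-- def gera_sinal(N, periodo):
--     x = []
--     cont = 0
--     for i in range(0, ((periodo * N))):
--         if cont >= 1 and cont <= 4:
--             x.append(1)
--             cont += 1
--         elif cont >= 5 and cont <= 8:
--             x.append(-1)
--             cont += 1
--         else:
--             x.append(0)
--             cont = 1
--
--     return x
-- ===== SOURCE B (Python) =====
-- def gera_sinal(N, periodo):
--     total = periodo * N
--     blocks = -(-total // 9)          # ceil(total / 9) whole periods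
--     period = [0] + [1] * 4 + [-1] * 4
--     return (period * blocks)[:total]
-- ===== Notes on version B (the rewrite author's own statement) =====
-- stated objective: simpler
-- what changed: Instead of emitting elements one by one with a running counter and three branches, B builds the 9-sample period once, replicates it ceil(total/9) times with list multiplication, and truncates to the exact length with a slice; the per-element Python-level branch work is replaced by C-level list repetition, a constant-factor speedup.
import Mathlib
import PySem

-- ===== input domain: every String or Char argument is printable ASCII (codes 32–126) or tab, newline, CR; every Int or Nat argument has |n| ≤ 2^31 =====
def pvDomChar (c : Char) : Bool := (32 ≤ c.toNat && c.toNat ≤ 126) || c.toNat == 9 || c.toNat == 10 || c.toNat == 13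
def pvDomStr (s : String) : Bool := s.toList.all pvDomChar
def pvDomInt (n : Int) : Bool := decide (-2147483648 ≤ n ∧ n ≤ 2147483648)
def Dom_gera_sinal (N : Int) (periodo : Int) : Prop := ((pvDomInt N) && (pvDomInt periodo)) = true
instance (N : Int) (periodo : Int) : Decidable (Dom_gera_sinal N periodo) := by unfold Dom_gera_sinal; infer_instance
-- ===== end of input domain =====

-- B builds one 9-sample period, replicates it ceil(total/9) times with list
-- multiplication, and truncates with a slice — no per-element counter (objective: simpler).

-- ===== PORT A =====
-- A's loop body: state is (x, cont); the loop index is unused by the body.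
def gera_sinal_step (st : List Int × Int) (_i : Int) : List Int × Int :=
  if st.2 ≥ 1 ∧ st.2 ≤ 4 then (st.1 ++ [1], st.2 + 1)
  else if st.2 ≥ 5 ∧ st.2 ≤ 8 then (st.1 ++ [-1], st.2 + 1)
  else (st.1 ++ [0], 1)

def gera_sinal (N : Int) (periodo : Int) : List Int :=
  ((PySem.List.pyRange 0 (periodo * N) 1).foldl gera_sinal_step ([], 0)).1

-- ===== PORT B =====
def gera_sinal_alt (N : Int) (periodo : Int) : List Int :=
  let total := periodo * N
  let blocks := -(PySem.Int.floordiv (-total) 9)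
  let period : List Int := [0] ++ PySem.List.pyRepeat [1] 4 ++ PySem.List.pyRepeat [-1] 4
  PySem.List.slice (PySem.List.pyRepeat period blocks) none (some total)

-- ===== PRECONDITION & SPEC =====
def Spec_gera_sinal (N : Int) (periodo : Int) (out : List Int) : Prop := out = gera_sinal_alt N periodo
instance (N : Int) (periodo : Int) (out : List Int) : Decidable (Spec_gera_sinal N periodo out) := by unfold Spec_gera_sinal; infer_instance

-- ===== CLAIM =====
def Claim_equal_gera_sinal : Prop := ∀ (N : Int) (periodo : Int), Dom_gera_sinal N periodo → Spec_gera_sinal N periodo (gera_sinal N periodo)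

-- ===== LEMMAS AND PROOFS =====

def pvPeriod : List Int := [0, 1, 1, 1, 1, -1, -1, -1, -1]

def pvTab (k : Nat) : Int := pvPeriod.getD (k % 9) 0

def pvCont (n : Nat) : Int := if n = 0 then 0 else ((n - 1) % 9 : Nat) + 1

-- A's foldl computed in closed form: the output is the period table read off by index.
theorem pvKey (n : Nat) :
    ((List.range n).map (Nat.cast : Nat → Int)).foldl gera_sinal_step ([], 0)
      = ((List.range n).map pvTab, pvCont n) := by
  induction n with
  | zero => decide
  | succ m ih =>
      rw [List.range_succ, List.map_append, List.map_append, List.foldl_append, ih]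
      simp only [List.map_cons, List.map_nil, List.foldl_cons, List.foldl_nil]
      rcases Nat.eq_zero_or_pos m with hm | hm
      · subst hm; decide
      · obtain ⟨k, rfl⟩ := Nat.exists_eq_add_of_le hm
        have h9 : k % 9 < 9 := Nat.mod_lt _ (by norm_num)
        simp only [gera_sinal_step, pvCont, pvTab, Nat.add_sub_cancel_left] at *
        interval_cases h : k % 9 <;>
          · have h2 : (1 + k) % 9 = (k % 9 + 1) % 9 := by omega
            simp only [Nat.add_sub_cancel, if_neg (by omega : ¬ (1 + k = 0)),
              if_neg (by omega : ¬ (1 + k + 1 = 0)), h, h2]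
            norm_num [pvPeriod]

-- m replicated periods flattened = the table read off positions 0 .. 9*m-1.
theorem pvFlat (m : Nat) :
    (List.replicate m pvPeriod).flatten = (List.range (9 * m)).map pvTab := by
  induction m with
  | zero => decide
  | succ k ih =>
      rw [List.replicate_succ', List.flatten_append, ih,
        show 9 * (k + 1) = 9 * k + 9 from by ring, List.range_add, List.map_append]
      congr 1
      have h2 : ∀ j ∈ List.range 9, (pvTab ∘ fun x => 9 * k + x) j = pvPeriod.getD j 0 := by
        intro j hj
        rw [List.mem_range] at hj
        simp only [Function.comp_apply, pvTab]
        congr 1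
        omega
      rw [List.map_map, List.map_congr_left h2]
      decide

theorem pvRangeEq (m : Int) :
    PySem.List.pyRange 0 m 1 = (List.range m.toNat).map (Nat.cast : Nat → Int) := by
  rw [PySem.List.pyRange_one]
  simp

-- ===== VERDICT =====
theorem gera_sinal_spec : Claim_equal_gera_sinal := by
  intro N periodo _
  unfold Spec_gera_sinal gera_sinal gera_sinal_alt
  rw [pvRangeEq, pvKey]
  show _ = PySem.List.slice _ none (some (periodo * N))
  by_cases h : periodo * N ≤ 0
  · have h0 : (periodo * N).toNat = 0 := Int.toNat_of_nonpos h
    have hb : (-(PySem.Int.floordiv (-(periodo * N)) 9)).toNat = 0 := by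
      have : 0 ≤ PySem.Int.floordiv (-(periodo * N)) 9 := by
        rw [PySem.Int.floordiv_eq_ediv_of_pos (by omega)]
        exact Int.ediv_nonneg (by omega) (by omega)
      omega
    have hrep0 : PySem.List.pyRepeat ([0] ++ PySem.List.pyRepeat [1] 4 ++ PySem.List.pyRepeat [-1] 4 : List Int)
        (-(PySem.Int.floordiv (-(periodo * N)) 9)) = ([] : List Int) := by
      simp only [PySem.List.pyRepeat, hb, List.replicate_zero, List.flatten_nil]
    rw [hrep0]
    simp [PySem.List.slice, h0]
  · have h : 0 < periodo * N := by omega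
    set n : Nat := (periodo * N).toNat with hn
    have hN : (periodo * N) = (n : Int) := by omega
    have hblocks : -(PySem.Int.floordiv (-(periodo * N)) 9) = (((n + 8) / 9 : Nat) : Int) := by
      rw [hN, (PySem.Int.neg_floordiv_neg_eq_iff_of_pos (by omega))]
      constructor <;> [push_cast; push_cast] <;> omega
    rw [hblocks, hN]
    have hper : ([0] ++ PySem.List.pyRepeat [1] 4 ++ PySem.List.pyRepeat [-1] 4 : List Int)
        = pvPeriod := by decide
    rw [hper]
    have hrep : PySem.List.pyRepeat pvPeriod (((n + 8) / 9 : Nat) : Int)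
        = (List.range (9 * ((n + 8) / 9))).map pvTab := by
      rw [show PySem.List.pyRepeat pvPeriod (((n + 8) / 9 : Nat) : Int)
          = (List.replicate ((((n + 8) / 9 : Nat) : Int)).toNat pvPeriod).flatten from rfl,
        Int.toNat_natCast, pvFlat]
    rw [hrep]
    show List.map pvTab (List.range n) = _
    rw [PySem.List.slice_to _ (Int.natCast_nonneg n), Int.toNat_natCast,
      ← List.map_take, List.take_range]
    clear_value n
    congr 1
    congr 1
    omega
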